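-- pv_equiv track=rewrite | github.com/bcveber/COSC101 | lab6/lab06.py | find
-- ===== SOURCE A (Python) =====
-- def find (s, substring, start, end):
--     '''
--     (str,str,int,int) --> (int)
--     This function returns the index of the first occurence of the string substring
--     within s, or the
--     value -1 if substring isn't found.
--     '''
--     newstring = s[start:end]
--     x = -1
--     found_substring = False
--     for index in range(len(newstring)):
--         substring_slice = newstring[index: len(substring)+index]
--         if substring_slice == substring:
--             found_substring = True
--             break
--     if found_substring == True:
--         return index+start
--     if found_substring == False:
--         return x
-- ===== SOURCE B (Python) =====
-- def _match_at(s, substring, i):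
--     for k in range(len(substring)):
--         if s[i + k] != substring[k]:
--             return False
--     return True
--
--
-- def find(s, substring, start, end):
--     '''Index of the first occurrence of substring within s[start:end], or -1.
--
--     Scans the original string in place between clamped absolute bounds (no
--     slice is ever built) and returns the absolute index of the match in s.
--     '''
--     n = len(s)
--     m = len(substring)
--     lo = max(n + start, 0) if start < 0 else min(start, n)
--     hi = max(n + end, 0) if end < 0 else min(end, n)
--     for i in range(lo, hi):
--         if i + m <= hi and _match_at(s, substring, i):
--             return i
--     return -1
-- ===== Notes on version B (the rewrite author's own statement) =====
-- stated objective: faster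
-- what changed: B scans the original string in place between clamped bounds with a char-by-char matcher that stops at the first mismatch, instead of materialising the s[start:end] slice and building and comparing a fresh slice object at every candidate position (no per-position O(m) slice copies), and it returns the absolute index in s.
-- intended difference: On calls with a negative start whose slice s[start:end] contains substring, A returns the slice-relative index plus the raw negative start (e.g. -2 for find('abc','b',-3,3)), while B returns the actual index of the first occurrence in s (1), which is what a find function is meant to return. — e.g. on find("abc", "b", -3, 3): A returns -2, B returns 1
import Mathlib
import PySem

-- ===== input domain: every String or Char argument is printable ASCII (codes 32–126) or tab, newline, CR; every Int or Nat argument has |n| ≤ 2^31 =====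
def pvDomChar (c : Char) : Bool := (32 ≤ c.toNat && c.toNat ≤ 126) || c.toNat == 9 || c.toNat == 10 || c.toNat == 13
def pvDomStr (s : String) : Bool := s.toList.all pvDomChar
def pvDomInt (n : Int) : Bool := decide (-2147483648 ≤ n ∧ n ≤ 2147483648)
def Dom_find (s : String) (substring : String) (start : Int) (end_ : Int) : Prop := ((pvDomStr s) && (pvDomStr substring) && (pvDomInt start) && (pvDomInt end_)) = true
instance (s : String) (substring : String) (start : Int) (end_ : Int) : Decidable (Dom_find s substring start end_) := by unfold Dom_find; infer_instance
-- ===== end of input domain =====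

-- B scans the original string in place between clamped bounds with a char-by-char matcher
-- instead of building and comparing a fresh slice at every position, and returns the absolute
-- index in s (A's slice-relative offset for negative start is stated below as D_find).

-- ===== PORT A =====
-- the 'for index in range(len(newstring)): … break' loop: first index whose slice equals substring
def findAGo (seg sub : List Char) : List Int → Option Int
  | [] => none
  | idx :: rest =>
    if PySem.List.slice seg (some idx) (some ((sub.length : Int) + idx)) = sub then some idx
    else findAGo seg sub rest

def find (s : String) (substring : String) (start : Int) (end_ : Int) : Int :=
  let newstring := PySem.List.slice s.toList (some start) (some end_)
  match findAGo newstring substring.toList (PySem.List.pyRange 0 (newstring.length : Int) 1) with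
  | some index => index + start
  | none => -1

-- ===== PORT B =====
-- _match_at: 'for k in range(len(substring)): if s[i+k] != substring[k]: return False'.
-- every index is in range whenever it is called (0 ≤ i, i + len(substring) ≤ hi ≤ len(s),
-- 0 ≤ k < len(substring)), so comparing the two pyGet? options is exact there.
def matchAtGo (sc sub : List Char) (i : Int) : List Int → Bool
  | [] => true
  | k :: ks =>
    if PySem.List.pyGet? sc (i + k) ≠ PySem.List.pyGet? sub k then false
    else matchAtGo sc sub i ks

-- 'for i in range(lo, hi): if i + m <= hi and _match_at(s, substring, i): return i'
def findBGo (sc sub : List Char) (hi : Int) : List Int → Int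
  | [] => -1
  | i :: rest =>
    if i + (sub.length : Int) ≤ hi ∧
        matchAtGo sc sub i (PySem.List.pyRange 0 (sub.length : Int) 1) = true then i
    else findBGo sc sub hi rest

def find_alt (s : String) (substring : String) (start : Int) (end_ : Int) : Int :=
  let n : Int := (s.toList.length : Int)
  let lo : Int := if start < 0 then max (n + start) 0 else min start n
  let hi : Int := if end_ < 0 then max (n + end_) 0 else min end_ n
  findBGo s.toList substring.toList hi (PySem.List.pyRange lo hi 1)

-- ===== PRECONDITION & SPEC =====
-- On calls with a negative start whose slice s[start:end] contains substring, A returns the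
-- slice-relative index plus the raw negative start (e.g. -2 for find('abc','b',-3,3)), while B
-- returns the actual index of the first occurrence in s (1), which is what a find is meant to return.
def D_find (s : String) (substring : String) (start : Int) (end_ : Int) : Prop :=
  start < 0 ∧ ∃ j ∈ List.range (PySem.List.slice s.toList (some start) (some end_)).length,
    substring.toList <+: (PySem.List.slice s.toList (some start) (some end_)).drop j
instance (s : String) (substring : String) (start : Int) (end_ : Int) : Decidable (D_find s substring start end_) := by unfold D_find; infer_instance

def Spec_find (s : String) (substring : String) (start : Int) (end_ : Int) (out : Int) : Prop := ¬ D_find s substring start end_ → out = find_alt s substring start end_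
instance (s : String) (substring : String) (start : Int) (end_ : Int) (out : Int) : Decidable (Spec_find s substring start end_ out) := by unfold Spec_find; infer_instance

def pvDiffWitness_find : String × String × Int × Int := ("abc", "b", -3, 3)
def pvDiffWitnessOut_find : Int × Int := (-2, 1)

-- ===== CLAIM (what is proved, stated in full; the proofs are below) =====
def Claim_unchanged_find : Prop := ∀ (s : String) (substring : String) (start : Int) (end_ : Int), Dom_find s substring start end_ → Spec_find s substring start end_ (find s substring start end_)
def Claim_changed_find : Prop := Dom_find (pvDiffWitness_find.1) (pvDiffWitness_find.2.1) (pvDiffWitness_find.2.2.1) (pvDiffWitness_find.2.2.2) ∧ D_find (pvDiffWitness_find.1) (pvDiffWitness_find.2.1) (pvDiffWitness_find.2.2.1) (pvDiffWitness_find.2.2.2) ∧ find (pvDiffWitness_find.1) (pvDiffWitness_find.2.1) (pvDiffWitness_find.2.2.1) (pvDiffWitness_find.2.2.2) = pvDiffWitnessOut_find.1 ∧ find_alt (pvDiffWitness_find.1) (pvDiffWitness_find.2.1) (pvDiffWitness_find.2.2.1) (pvDiffWitness_find.2.2.2) = pvDiffWitnessOut_find.2 ∧ pvDiffWitnessOut_find.1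 ≠ pvDiffWitnessOut_find.2
def Claim_exact_find : Prop := ∀ (s : String) (substring : String) (start : Int) (end_ : Int), Dom_find s substring start end_ → D_find s substring start end_ → find s substring start end_ ≠ find_alt s substring start end_

-- ===== LEMMAS AND PROOFS =====

lemma matchAtGo_eq_true_iff (sc sub : List Char) (i : Int) (ks : List Int) :
    matchAtGo sc sub i ks = true ↔ ∀ k ∈ ks, PySem.List.pyGet? sc (i + k) = PySem.List.pyGet? sub k := by
  induction ks with
  | nil => simp [matchAtGo]
  | cons k ks ih =>
    by_cases h : PySem.List.pyGet? sc (i + k) = PySem.List.pyGet? sub k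
    · simp [matchAtGo, h, ih]
    · simp [matchAtGo, h]

-- the inner loop succeeds exactly when substring is a prefix of s[j:]
lemma matchAt_iff (sc sub : List Char) (j : Nat) :
    matchAtGo sc sub (j : Int) (PySem.List.pyRange 0 (sub.length : Int) 1) = true ↔ sub <+: sc.drop j := by
  rw [matchAtGo_eq_true_iff, List.prefix_iff_getElem?]
  constructor
  · intro h t ht
    have hm := h (t : Int) (by rw [PySem.List.mem_pyRange_one]; omega)
    have : ((j : Int) + (t : Int)) = ((j + t : Nat) : Int) := by push_cast; ring
    rw [this, PySem.List.pyGet?_natCast, PySem.List.pyGet?_natCast] at hm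
    rw [List.getElem?_drop, hm, List.getElem?_eq_getElem ht]
  · intro h k hk
    rw [PySem.List.mem_pyRange_one] at hk
    have ht : k.toNat < sub.length := by omega
    have hk' : (k.toNat : Int) = k := by omega
    have hm := h k.toNat ht
    rw [List.getElem?_drop] at hm
    have h2 : ((j : Int) + k) = ((j + k.toNat : Nat) : Int) := by omega
    rw [h2, ← hk', PySem.List.pyGet?_natCast, PySem.List.pyGet?_natCast,
      Int.toNat_natCast, hm, List.getElem?_eq_getElem ht]

-- A's loop condition (slice equality) is exactly "substring is a prefix of newstring[j:]"
lemma condA_iff (seg sub : List Char) (j : Nat) :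
    (PySem.List.slice seg (some (j : Int)) (some ((sub.length : Int) + (j : Int))) = sub) ↔
      sub <+: seg.drop j := by
  have ha : PySem.List.clampIdx seg.length (j : Int) = min j seg.length := by
    unfold PySem.List.clampIdx; rw [if_neg (by omega)]; omega
  have hb : PySem.List.clampIdx seg.length ((sub.length : Int) + (j : Int)) = min (sub.length + j) seg.length := by
    unfold PySem.List.clampIdx; rw [if_neg (by omega)]; omega
  show (seg.drop (PySem.List.clampIdx seg.length (j : Int))).take
      (PySem.List.clampIdx seg.length ((sub.length : Int) + (j : Int)) - PySem.List.clampIdx seg.length (j : Int)) = sub ↔ _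
  rw [ha, hb]
  by_cases hj : j ≤ seg.length
  · have h1 : min j seg.length = j := by omega
    rw [h1]
    have h2 : min (sub.length + j) seg.length - j = min sub.length (seg.length - j) := by omega
    rw [h2]
    have hxs : (seg.drop j).length = seg.length - j := by simp
    have h3 : (seg.drop j).take (min sub.length (seg.length - j)) = (seg.drop j).take sub.length := by
      rcases le_total sub.length (seg.length - j) with h | h
      · rw [min_eq_left h]
      · rw [min_eq_right h, List.take_of_length_le (by omega), List.take_of_length_le (by omega)]
    rw [h3]
    constructor
    · intro h; rw [← h]; exact List.take_prefix _ _
    · intro h; rw [List.prefix_iff_eq_take] at h; rw [← h]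
  · have h1 : min j seg.length = seg.length := by omega
    have h2 : seg.drop j = [] := List.drop_of_length_le (by omega)
    rw [h1, h2, List.drop_length]
    simp [eq_comm]

lemma seg_prefix_iff (sc sub : List Char) (lo' hi' j : Nat) (hj : j < hi' - lo') :
    sub <+: (((sc.drop lo').take (hi' - lo')).drop j) ↔
      (lo' + j + sub.length ≤ hi' ∧ sub <+: sc.drop (lo' + j)) := by
  rw [List.drop_take, List.drop_drop, List.prefix_take_iff]
  constructor
  · rintro ⟨h1, h2⟩
    exact ⟨by omega, h1⟩
  · rintro ⟨h1, h2⟩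
    exact ⟨h2, by omega⟩

lemma findAGo_none_iff (seg sub : List Char) (js : List Int) :
    findAGo seg sub js = none ↔
      ∀ idx ∈ js, ¬ (PySem.List.slice seg (some idx) (some ((sub.length : Int) + idx)) = sub) := by
  induction js with
  | nil => simp [findAGo]
  | cons idx rest ih =>
    by_cases h : PySem.List.slice seg (some idx) (some ((sub.length : Int) + idx)) = sub
    · simp [findAGo, h]
    · simp [findAGo, h, ih]

lemma findAGo_some_mem (seg sub : List Char) (js : List Int) (x : Int)
    (h : findAGo seg sub js = some x) :
    x ∈ js ∧ PySem.List.slice seg (some x) (some ((sub.length : Int) + x)) = sub := by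
  induction js with
  | nil => simp [findAGo] at h
  | cons idx rest ih =>
    by_cases hc : PySem.List.slice seg (some idx) (some ((sub.length : Int) + idx)) = sub
    · rw [findAGo, if_pos hc] at h
      obtain rfl : idx = x := by simpa using h
      exact ⟨List.mem_cons_self, hc⟩
    · rw [findAGo, if_neg hc] at h
      obtain ⟨h1, h2⟩ := ih h
      exact ⟨List.mem_cons_of_mem _ h1, h2⟩

-- the two loops visit corresponding positions (t in the slice ↔ lo'+t in s) and agree step by step
lemma loops_corr (sc sub seg : List Char) (lo' hi' : Nat)
    (hseg : seg.length = hi' - lo')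
    (heq : ∀ t : Nat, t < seg.length →
      ((PySem.List.slice seg (some (t : Int)) (some ((sub.length : Int) + (t : Int))) = sub) ↔
        (((lo' + t : Nat) : Int) + (sub.length : Int) ≤ (hi' : Int) ∧
          matchAtGo sc sub ((lo' + t : Nat) : Int) (PySem.List.pyRange 0 (sub.length : Int) 1) = true))) :
    ∀ cnt j, cnt = seg.length - j →
      findBGo sc sub (hi' : Int) (PySem.List.pyRange ((lo' + j : Nat) : Int) (hi' : Int) 1) =
        (findAGo seg sub (PySem.List.pyRange (j : Nat) (seg.length : Int) 1)).elim (-1)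
          (fun x => x + (lo' : Int)) := by
  intro cnt
  induction cnt with
  | zero =>
    intro j hj
    have hA : PySem.List.pyRange (j : Int) (seg.length : Int) 1 = [] := by
      apply PySem.List.pyRange_one_eq_nil; omega
    have hB : PySem.List.pyRange ((lo' + j : Nat) : Int) (hi' : Int) 1 = [] := by
      apply PySem.List.pyRange_one_eq_nil; omega
    rw [hA, hB]; rfl
  | succ cnt ih =>
    intro j hj
    by_cases hjl : j < seg.length
    · have hAcons := PySem.List.pyRange_one_cons (a := (j : Int)) (b := (seg.length : Int)) (by omega)
      have hBcons := PySem.List.pyRange_one_cons (a := ((lo' + j : Nat) : Int)) (b := (hi' : Int)) (by omega)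
      rw [hAcons, hBcons, findAGo, findBGo]
      by_cases hc : PySem.List.slice seg (some (j : Int)) (some ((sub.length : Int) + (j : Int))) = sub
      · rw [if_pos hc, if_pos ((heq j hjl).mp hc)]
        simp only [Option.elim_some]; push_cast; ring
      · rw [if_neg hc, if_neg (fun hb => hc ((heq j hjl).mpr hb))]
        have e1 : ((lo' + j : Nat) : Int) + 1 = ((lo' + (j+1) : Nat) : Int) := by push_cast; ring
        have e2 : ((j : Nat) : Int) + 1 = (((j+1 : Nat)) : Int) := by push_cast; ring
        rw [e1, e2]
        exact ih (j+1) (by omega)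
    · omega

lemma clampIdx_cast (n : Nat) (a : Int) :
    (if a < 0 then max ((n : Int) + a) 0 else min a (n : Int)) = ((PySem.List.clampIdx n a : Nat) : Int) := by
  unfold PySem.List.clampIdx; split_ifs <;> omega

lemma clampIdx_le (n : Nat) (a : Int) : PySem.List.clampIdx n a ≤ n := by
  unfold PySem.List.clampIdx; split_ifs <;> omega

lemma heq_main (sc sub : List Char) (lo' hi' : Nat) (hhi : hi' ≤ sc.length) :
    ∀ t : Nat, t < ((sc.drop lo').take (hi' - lo')).length →
      ((PySem.List.slice ((sc.drop lo').take (hi' - lo')) (some (t : Int)) (some ((sub.length : Int) + (t : Int))) = sub) ↔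
        (((lo' + t : Nat) : Int) + (sub.length : Int) ≤ (hi' : Int) ∧
          matchAtGo sc sub ((lo' + t : Nat) : Int) (PySem.List.pyRange 0 (sub.length : Int) 1) = true)) := by
  intro t ht
  have hlen : ((sc.drop lo').take (hi' - lo')).length = hi' - lo' := by
    simp; omega
  rw [condA_iff, seg_prefix_iff sc sub lo' hi' t (by omega), matchAt_iff]
  constructor
  · rintro ⟨h1, h2⟩; exact ⟨by omega, h2⟩
  · rintro ⟨h1, h2⟩; exact ⟨by omega, h2⟩

-- B equals A's loop result shifted by the clamped start position
lemma main_corr (s substring : String) (start end_ : Int) :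
    find_alt s substring start end_ =
      (findAGo (PySem.List.slice s.toList (some start) (some end_)) substring.toList
        (PySem.List.pyRange 0 ((PySem.List.slice s.toList (some start) (some end_)).length : Int) 1)).elim
        (-1) (fun x => x + (PySem.List.clampIdx s.toList.length start : Int)) := by
  set sc := s.toList with hsc
  set sub := substring.toList with hsub
  set lo' := PySem.List.clampIdx sc.length start with hlo'
  set hi' := PySem.List.clampIdx sc.length end_ with hhi'
  have hseg : PySem.List.slice sc (some start) (some end_) = (sc.drop lo').take (hi' - lo') := rfl
  have hseglen : ((sc.drop lo').take (hi' - lo')).length = hi' - lo' := by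
    have := clampIdx_le sc.length end_
    simp; omega
  have hcorr := loops_corr sc sub ((sc.drop lo').take (hi' - lo')) lo' hi' hseglen
    (heq_main sc sub lo' hi' (clampIdx_le sc.length end_)) (((sc.drop lo').take (hi' - lo')).length) 0 rfl
  simp only [Nat.add_zero, Nat.cast_zero] at hcorr
  show (let n : Int := (sc.length : Int);
    let lo : Int := if start < 0 then max (n + start) 0 else min start n
    let hi : Int := if end_ < 0 then max (n + end_) 0 else min end_ n
    findBGo sc sub hi (PySem.List.pyRange lo hi 1)) = _
  simp only [clampIdx_cast]
  rw [← hlo', ← hhi', hseg, hcorr]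

-- ===== VERDICT (by name: the statement is the Claim_ definition above) =====
theorem find_spec : Claim_unchanged_find := by
  intro s substring start end_ _hdom
  unfold Spec_find
  intro hnd
  rw [main_corr]
  show (match findAGo (PySem.List.slice s.toList (some start) (some end_)) substring.toList
      (PySem.List.pyRange 0 ((PySem.List.slice s.toList (some start) (some end_)).length : Int) 1) with
    | some index => index + start
    | none => -1) = _
  cases h : findAGo (PySem.List.slice s.toList (some start) (some end_)) substring.toList
      (PySem.List.pyRange 0 ((PySem.List.slice s.toList (some start) (some end_)).length : Int) 1) with
  | none => rfl
  | some x =>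
    obtain ⟨hmem, hcond⟩ := findAGo_some_mem _ _ _ _ h
    rw [PySem.List.mem_pyRange_one] at hmem
    have hxt : ((x.toNat : Nat) : Int) = x := by omega
    rw [← hxt] at hcond
    have hpre := (condA_iff _ _ _).mp hcond
    have hex : ∃ j ∈ List.range (PySem.List.slice s.toList (some start) (some end_)).length,
        substring.toList <+: (PySem.List.slice s.toList (some start) (some end_)).drop j :=
      ⟨x.toNat, List.mem_range.mpr (by omega), hpre⟩
    have hstart : 0 ≤ start := by
      by_contra hneg
      exact hnd ⟨by omega, hex⟩
    have hlen : (PySem.List.slice s.toList (some start) (some end_)).length =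
        PySem.List.clampIdx s.toList.length end_ - PySem.List.clampIdx s.toList.length start := by
      show ((s.toList.drop _).take _).length = _
      have := clampIdx_le s.toList.length end_
      simp only [List.length_take, List.length_drop]
      omega
    have hlt : PySem.List.clampIdx s.toList.length start < s.toList.length := by
      have h1 := clampIdx_le s.toList.length end_
      rw [hlen] at hmem
      omega
    have hloeq : ((PySem.List.clampIdx s.toList.length start : Nat) : Int) = start := by
      unfold PySem.List.clampIdx at hlt ⊢
      rw [if_neg (by omega)] at hlt ⊢
      omega
    simp only [Option.elim_some]
    rw [hloeq]

theorem find_changed : Claim_changed_find := by unfold Claim_changed_find; decide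

theorem find_tight : Claim_exact_find := by
  intro s substring start end_ _hdom hD
  obtain ⟨hneg, j0, hj0mem, hj0pre⟩ := hD
  rw [List.mem_range] at hj0mem
  rw [main_corr]
  show (match findAGo (PySem.List.slice s.toList (some start) (some end_)) substring.toList
      (PySem.List.pyRange 0 ((PySem.List.slice s.toList (some start) (some end_)).length : Int) 1) with
    | some index => index + start
    | none => -1) ≠ _
  cases h : findAGo (PySem.List.slice s.toList (some start) (some end_)) substring.toList
      (PySem.List.pyRange 0 ((PySem.List.slice s.toList (some start) (some end_)).length : Int) 1) with
  | none =>
    rw [findAGo_none_iff] at h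
    have hmem : ((j0 : Nat) : Int) ∈ PySem.List.pyRange 0 ((PySem.List.slice s.toList (some start) (some end_)).length : Int) 1 := by
      rw [PySem.List.mem_pyRange_one]; omega
    exact absurd ((condA_iff _ _ j0).mpr hj0pre) (h _ hmem)
  | some x =>
    simp only [Option.elim_some]
    intro heq
    have h2 : start = ((PySem.List.clampIdx s.toList.length start : Nat) : Int) :=
      add_left_cancel heq
    have h0 : (0 : Int) ≤ (PySem.List.clampIdx s.toList.length start : Int) := by positivity
    omega
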